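-- pv_equiv track=rewrite | github.com/jerosiet/ontology_backend | MINDMAP_chatbot-master/back_end/server.py | preprocess_paragraphs
-- ===== SOURCE A (Python) =====
-- def preprocess_paragraphs(list_paragraphs):
--     new_list_paragraphs = []
--     flag = 0
--     idx_count = 0
--
--     for idx, para in enumerate(list_paragraphs):
--         if para.startswith('<TITLE>_'):
--             if flag == 0 and idx_count > 0: # If previous was content, add it before new title sequence
--                 new_list_paragraphs.append(''.join(list_paragraphs[idx - idx_count : idx]))
--                 idx_count = 0
--             flag = 1
--             idx_count += 1
--         else:
--             if flag == 1: # End of a title sequence, combine and add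
--                 combined_title = ''.join(list_paragraphs[idx - idx_count : idx])
--                 new_list_paragraphs.append(combined_title)
--                 idx_count = 0
--             flag = 0
--             new_list_paragraphs.append(para)
--
--     # Handle any remaining combined titles or content at the end
--     if idx_count > 0:
--         new_list_paragraphs.append(''.join(list_paragraphs[len(list_paragraphs) - idx_count : len(list_paragraphs)]))
--
--     return [p for p in new_list_paragraphs if p.strip()] # Filter out empty strings
-- ===== SOURCE B (Python) =====
-- def preprocess_paragraphs(list_paragraphs):
--     n = len(list_paragraphs)
--     result = []
--     i = 0
--     while i < n:
--         if list_paragraphs[i].startswith('<TITLE>_'):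
--             j = i + 1
--             while j < n and list_paragraphs[j].startswith('<TITLE>_'):
--                 j += 1
--             result.append(''.join(list_paragraphs[i:j]))
--             i = j
--         else:
--             result.append(list_paragraphs[i])
--             i += 1
--     return [p for p in result if p.strip()]
-- ===== Notes on version B (the rewrite author's own statement) =====
-- stated objective: alternative
-- what changed: Replaces A's flag/idx_count state machine (with back-slicing into the original list) by a two-pointer scan that consumes each maximal '<TITLE>_' run in one inner scan and joins it directly.
import Mathlib
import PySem

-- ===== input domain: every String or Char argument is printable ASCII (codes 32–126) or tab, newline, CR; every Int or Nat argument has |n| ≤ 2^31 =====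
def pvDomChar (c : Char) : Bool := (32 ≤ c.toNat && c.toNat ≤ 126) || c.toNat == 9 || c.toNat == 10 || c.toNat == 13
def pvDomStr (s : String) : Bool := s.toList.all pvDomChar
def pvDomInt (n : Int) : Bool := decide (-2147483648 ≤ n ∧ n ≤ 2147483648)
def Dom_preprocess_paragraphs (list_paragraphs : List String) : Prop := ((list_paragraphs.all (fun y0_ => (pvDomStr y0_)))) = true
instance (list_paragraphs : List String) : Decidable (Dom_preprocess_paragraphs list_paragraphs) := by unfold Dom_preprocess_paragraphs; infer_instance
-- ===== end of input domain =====

-- B replaces A's flag/idx_count state machine by a two-pointer scan over maximal title runs (alternative decomposition, same cost); return value only, no mutation.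

-- ===== PORT A =====
-- loop body of A's for-loop; state = (new_list, flag, idx_count)
def pvStepA (list_paragraphs : List String) (st : List String × Int × Int) (ip : Int × String) : List String × Int × Int :=
  let new_list := st.1; let flag := st.2.1; let idx_count := st.2.2
  let idx := ip.1; let para := ip.2
  if PySem.Str.startswith para "<TITLE>_" then
    let (new_list, idx_count) :=
      if flag = 0 ∧ idx_count > 0 then
        (new_list ++ [PySem.Str.join "" (PySem.List.slice list_paragraphs (some (idx - idx_count)) (some idx))], 0)
      else (new_list, idx_count)
    (new_list, 1, idx_count + 1)
  else
    let (new_list, idx_count) :=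
      if flag = 1 then
        (new_list ++ [PySem.Str.join "" (PySem.List.slice list_paragraphs (some (idx - idx_count)) (some idx))], 0)
      else (new_list, idx_count)
    (new_list ++ [para], 0, idx_count)

def preprocess_paragraphs (list_paragraphs : List String) : List String :=
  let st := (PySem.List.enumerate list_paragraphs 0).foldl (pvStepA list_paragraphs) ([], 0, 0)
  let new_list :=
    if st.2.2 > 0 then
      st.1 ++ [PySem.Str.join "" (PySem.List.slice list_paragraphs
        (some ((list_paragraphs.length : Int) - st.2.2)) (some (list_paragraphs.length : Int)))]
    else st.1
  new_list.filter (fun p => PySem.Str.strip p != "")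

-- ===== PORT B =====
def pvTitle (p : String) : Bool := PySem.Str.startswith p "<TITLE>_"

-- B's outer while-loop: each step consumes one maximal title run (inner scan = takeWhile/dropWhile) or one plain paragraph
def pvRuns : List String → List String
  | [] => []
  | p :: ps =>
    if pvTitle p then
      PySem.Str.join "" (p :: ps.takeWhile pvTitle) :: pvRuns (ps.dropWhile pvTitle)
    else
      p :: pvRuns ps
termination_by l => l.length
decreasing_by
  · exact Nat.lt_succ_of_le (List.length_dropWhile_le _ _)
  · exact Nat.lt_succ_self _

def preprocess_paragraphs_alt (list_paragraphs : List String) : List String :=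
  (pvRuns list_paragraphs).filter (fun p => PySem.Str.strip p != "")

-- ===== PRECONDITION & SPEC =====
def Spec_preprocess_paragraphs (list_paragraphs : List String) (out : List String) : Prop := out = preprocess_paragraphs_alt list_paragraphs
instance (list_paragraphs : List String) (out : List String) : Decidable (Spec_preprocess_paragraphs list_paragraphs out) := by unfold Spec_preprocess_paragraphs; infer_instance

-- ===== CLAIM (what is proved, stated in full; the proofs are below) =====
def Claim_equal_preprocess_paragraphs : Prop := ∀ (list_paragraphs : List String), Dom_preprocess_paragraphs list_paragraphs → Spec_preprocess_paragraphs list_paragraphs (preprocess_paragraphs list_paragraphs)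

-- ===== LEMMAS AND PROOFS =====

lemma pvTakeWhile_append {α : Type} (q : α → Bool) (xs ys : List α) (h : ∀ x ∈ xs, q x = true) :
    (xs ++ ys).takeWhile q = xs ++ ys.takeWhile q := by
  induction xs with
  | nil => simp
  | cons a as ih =>
    simp [h a (by simp)]
    exact ih (fun x hx => h x (by simp [hx]))

lemma pvDropWhile_append {α : Type} (q : α → Bool) (xs ys : List α) (h : ∀ x ∈ xs, q x = true) :
    (xs ++ ys).dropWhile q = ys.dropWhile q := by
  induction xs with
  | nil => simp
  | cons a as ih =>
    simp [h a (by simp)]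
    exact ih (fun x hx => h x (by simp [hx]))

-- main invariant: the rest of A's loop (plus the trailing flush) produces acc ++ pvRuns (run ++ suf),
-- where run is the pending maximal title run just before the current index
lemma pvGo (full : List String) (suf : List String) :
    ∀ (pre run acc : List String),
    full = pre ++ run ++ suf →
    (∀ r ∈ run, pvTitle r = true) →
    (let st := (PySem.List.enumerate suf ((pre.length + run.length : Nat) : Int)).foldl (pvStepA full)
        (acc, (if run = [] then 0 else 1), (run.length : Int))
     if st.2.2 > 0 then
       st.1 ++ [PySem.Str.join "" (PySem.List.slice full
         (some ((full.length : Int) - st.2.2)) (some (full.length : Int)))]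
     else st.1)
    = acc ++ pvRuns (run ++ suf) := by
  induction suf with
  | nil =>
    intro pre run acc hfull hrun
    simp only [PySem.List.enumerate_nil, List.foldl_nil, List.append_nil]
    rcases run with _ | ⟨r, rs⟩
    · simp [pvRuns]
    · have hlen : (0 : Int) < ((r :: rs).length : Int) := by push_cast [List.length_cons]; omega
      simp only [hlen, if_pos]
      have hcast : (full.length : Int) - ((r :: rs).length : Int) = (pre.length : Int) := by
        subst hfull; push_cast [List.length_append, List.length_cons, List.length_nil]; omega
      have hcast2 : (full.length : Int) = ((pre.length + (r :: rs).length : Nat) : Int) := by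
        subst hfull; push_cast [List.length_append, List.length_cons, List.length_nil]; omega
      rw [hcast, hcast2, PySem.List.slice_natCast]
      subst hfull
      simp only [List.append_nil, List.drop_left, Nat.add_sub_cancel_left, List.take_length]
      rw [pvRuns]
      have ht : rs.takeWhile pvTitle = rs := by
        have := pvTakeWhile_append pvTitle rs [] (fun x hx => hrun x (by simp [hx]))
        simpa using this
      have hd : rs.dropWhile pvTitle = [] := by
        have := pvDropWhile_append pvTitle rs [] (fun x hx => hrun x (by simp [hx]))
        simpa using this
      simp [hrun r (by simp), ht, hd, pvRuns]
  | cons p ps ih =>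
    intro pre run acc hfull hrun
    rw [PySem.List.enumerate_cons, List.foldl_cons]
    by_cases hp : pvTitle p = true
    · -- title paragraph: extend the pending run
      have hstep : pvStepA full (acc, (if run = [] then 0 else 1), (run.length : Int))
          (((pre.length + run.length : Nat) : Int), p)
          = (acc, 1, (run.length : Int) + 1) := by
        have hp' : PySem.Chars.startswith p.toList ['<','T','I','T','L','E','>','_'] = true := by
          simpa [pvTitle] using hp
        rcases run with _ | ⟨r, rs⟩ <;> simp [pvStepA, hp']
      rw [hstep]
      have h1 : full = pre ++ (run ++ [p]) ++ ps := by
        simp [hfull, List.append_assoc]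
      have h2 : ∀ r ∈ run ++ [p], pvTitle r = true := by
        intro r hr; rcases List.mem_append.1 hr with h | h
        · exact hrun r h
        · simp at h; subst h; exact hp
      have := ih pre (run ++ [p]) acc h1 h2
      have hst : ((pre.length + (run ++ [p]).length : Nat) : Int)
          = ((pre.length + run.length : Nat) : Int) + 1 := by
        push_cast [List.length_append, List.length_cons, List.length_nil]; omega
      have hne : ¬(run ++ [p] = []) := by simp
      have hlen : (((run ++ [p]).length : Nat) : Int) = (run.length : Int) + 1 := by
        push_cast [List.length_append, List.length_cons, List.length_nil]; omega
      simp only [hst, hlen, if_neg hne] at this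
      simpa [List.append_assoc] using this
    · -- non-title paragraph
      rcases run with _ | ⟨r, rs⟩
      · -- no pending run: emit p
        have hstep : pvStepA full (acc, 0, (0 : Int))
            (((pre.length + 0 : Nat) : Int), p) = (acc ++ [p], 0, 0) := by
          simp [pvStepA, pvTitle] at hp ⊢; simp [hp]
        simp only [reduceIte, List.length_nil, Nat.cast_zero]
        rw [hstep]
        have := ih (pre ++ [p]) [] (acc ++ [p]) (by simp [hfull]) (by simp)
        have hst : (((pre ++ [p]).length + ([] : List String).length : Nat) : Int)
            = ((pre.length + 0 : Nat) : Int) + 1 := by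
          push_cast [List.length_append, List.length_cons, List.length_nil]; omega
        rw [hst] at this
        simp only [reduceIte, List.length_nil, Nat.cast_zero] at this
        simpa [pvRuns, hp, List.append_assoc] using this
      · -- pending run r::rs: flush it, then emit p
        have hslice : PySem.List.slice full (some ((pre.length : Nat) : Int))
            (some ((pre.length + (r :: rs).length : Nat) : Int)) = r :: rs := by
          rw [PySem.List.slice_natCast,
            show full = pre ++ ((r :: rs) ++ p :: ps) from by simp [hfull, List.append_assoc],
            List.drop_left, Nat.add_sub_cancel_left]
          exact List.take_left
        have hsl2 : PySem.List.slice full (some ((pre.length : Int)))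
            (some ((pre.length : Int) + ((rs.length : Int) + 1))) = r :: rs := by
          rw [show ((pre.length : Int)) + ((rs.length : Int) + 1)
              = ((pre.length + (r :: rs).length : Nat) : Int) from by
            push_cast [List.length_cons]; ring]
          exact hslice
        have hp' : PySem.Chars.startswith p.toList ['<','T','I','T','L','E','>','_'] = false := by
          simpa [pvTitle] using hp
        have hstep : pvStepA full (acc, 1, (((r :: rs).length : Nat) : Int))
            (((pre.length + (r :: rs).length : Nat) : Int), p)
            = (acc ++ [PySem.Str.join "" (r :: rs)] ++ [p], 0, 0) := by
          simp [pvStepA, hp']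
          rw [hsl2]
        rw [if_neg (show ¬(r :: rs = ([] : List String)) by simp)]
        rw [hstep]
        have := ih (pre ++ (r :: rs) ++ [p]) []
            (acc ++ [PySem.Str.join "" (r :: rs)] ++ [p])
            (by simp [hfull, List.append_assoc]) (by simp)
        have hst : (((pre ++ (r :: rs) ++ [p]).length + ([] : List String).length : Nat) : Int)
            = ((pre.length + (r :: rs).length : Nat) : Int) + 1 := by
          push_cast [List.length_append, List.length_cons, List.length_nil]; omega
        rw [hst] at this
        simp only [reduceIte, List.length_nil, Nat.cast_zero] at this
        have hruns : pvRuns (r :: (rs ++ p :: ps))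
            = PySem.Str.join "" (r :: rs) :: p :: pvRuns ps := by
          have htw : (rs ++ p :: ps).takeWhile pvTitle = rs := by
            rw [pvTakeWhile_append pvTitle rs (p :: ps) (fun x hx => hrun x (by simp [hx]))]
            simp [hp]
          have hdw : (rs ++ p :: ps).dropWhile pvTitle = p :: ps := by
            rw [pvDropWhile_append pvTitle rs (p :: ps) (fun x hx => hrun x (by simp [hx]))]
            simp [hp]
          rw [pvRuns]
          simp [hrun r (by simp), htw, hdw]
          rw [pvRuns]
          simp [hp]
        simpa [hruns, List.append_assoc] using this

-- ===== VERDICT (by name: the statement is the Claim_ definition above) =====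
theorem preprocess_paragraphs_spec : Claim_equal_preprocess_paragraphs := by
  intro l _
  unfold Spec_preprocess_paragraphs preprocess_paragraphs preprocess_paragraphs_alt
  have := pvGo l l [] [] [] (by simp) (by simp)
  simp only [List.length_nil, Nat.add_zero, Nat.cast_zero, List.nil_append] at this
  rw [if_pos trivial] at this
  exact congrArg (List.filter (fun p => PySem.Str.strip p != "")) this
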